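-- pv_equiv track=rewrite | github.com/naist-nlp/luke-ner | data/convert_conll2003_to_jsonl.py | _conll_tags_to_spans
-- ===== SOURCE A (Python) =====
-- from typing import Any, Dict, Iterable, List, Tuple, Union
--
-- def _conll_tags_to_spans(tags: Iterable[str]) -> Iterable[Tuple[int, int, str]]:
--     # NOTE: assume IO scheme
--     start, label = -1, None
--     for i, tag in enumerate(list(tags) + ["O"]):
--         if tag == "O":
--             if start >= 0:
--                 assert label is not None
--                 yield (start, i, label)
--                 start, label = -1, None
--         else:
--             cur_label = tag[2:]
--             if cur_label != label:
--                 if start >= 0: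
--                     assert label is not None
--                     yield (start, i, label)
--                 start, label = i, cur_label
-- ===== SOURCE B (Python) =====
-- from itertools import groupby
-- from typing import Iterable, Tuple
--
-- def _conll_tags_to_spans(tags: Iterable[str]) -> Iterable[Tuple[int, int, str]]:
--     # NOTE: assume IO scheme. None sentinel keeps 'O' distinct from labels equal to 'O'.
--     i = 0
--     for key, grp in groupby(tags, key=lambda t: None if t == "O" else t[2:]):
--         n = sum(1 for _ in grp)
--         if key is not None:
--             yield (i, i + n, key)
--         i += n
-- ===== Notes on version B (the rewrite author's own statement) =====
-- stated objective: idiomatic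
-- what changed: Replaces the explicit start/label transition machine (with an appended 'O' sentinel tag to flush the last span) by an itertools.groupby pass over maximal runs of equal label keys, emitting one span per non-O group from a running index.
import Mathlib
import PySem

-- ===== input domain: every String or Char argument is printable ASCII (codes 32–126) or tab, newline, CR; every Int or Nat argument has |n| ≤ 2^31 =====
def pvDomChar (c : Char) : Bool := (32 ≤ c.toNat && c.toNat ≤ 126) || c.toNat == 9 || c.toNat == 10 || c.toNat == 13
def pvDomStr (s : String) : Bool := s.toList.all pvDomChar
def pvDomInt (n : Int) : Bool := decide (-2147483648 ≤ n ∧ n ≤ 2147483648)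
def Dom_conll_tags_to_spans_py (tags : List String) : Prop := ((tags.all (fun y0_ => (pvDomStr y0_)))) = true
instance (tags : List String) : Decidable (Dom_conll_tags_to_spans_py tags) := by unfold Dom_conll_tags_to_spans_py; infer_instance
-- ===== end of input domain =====

-- B replaces A's explicit start/label transition machine (with an appended "O" sentinel)
-- by a single groupby-style pass over maximal runs of equal label keys (objective: idiomatic).


-- ===== PORT A =====
-- the for-loop of A, state (i, start, label, yielded so far); branches in A's order
def pvALoop (i start : Int) (label : Option String) (out : List (Int × Int × String)) :
    List String → List (Int × Int × String)
  | [] => out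
  | tag :: rest =>
    if tag = "O" then
      if start ≥ 0 then
        match label with
        | some l => pvALoop (i + 1) (-1) none (out ++ [(start, i, l)]) rest
        | none   => pvALoop (i + 1) (-1) none out rest   -- unreachable (Python assert)
      else pvALoop (i + 1) start label out rest
    else
      let cur := PySem.Str.slice tag (some 2) none       -- tag[2:]
      if some cur ≠ label then
        if start ≥ 0 then
          match label with
          | some l => pvALoop (i + 1) i (some cur) (out ++ [(start, i, l)]) rest
          | none   => pvALoop (i + 1) i (some cur) out rest   -- unreachable (Python assert)
        else pvALoop (i + 1) i (some cur) out rest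
      else pvALoop (i + 1) start label out rest

def conll_tags_to_spans_py (tags : List String) : List (Int × Int × String) :=
  pvALoop 0 (-1) none [] (tags ++ ["O"])

-- ===== PORT B =====
-- the groupby key: None if t == "O" else t[2:]
def pvKey (t : String) : Option String :=
  if t = "O" then none else some (PySem.Str.slice t (some 2) none)

-- the groupby loop of B: consume one maximal run of equal keys per step, running index i
def pvBLoop (i : Int) (l : List String) : List (Int × Int × String) :=
  match l with
  | [] => []
  | t :: rest =>
    let k := pvKey t
    let n : Int := 1 + ((rest.takeWhile (fun u => pvKey u = k)).length : Int)
    let after := rest.dropWhile (fun u => pvKey u = k)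
    match k with
    | some key => (i, i + n, key) :: pvBLoop (i + n) after
    | none => pvBLoop (i + n) after
  termination_by l.length
  decreasing_by
    simp only [List.length_cons]
    exact Nat.lt_succ_of_le (List.length_dropWhile_le _ _)

def conll_tags_to_spans_py_alt (tags : List String) : List (Int × Int × String) :=
  pvBLoop 0 tags

-- ===== PRECONDITION & SPEC =====
def Spec_conll_tags_to_spans_py (tags : List String) (out : List (Int × Int × String)) : Prop := out = conll_tags_to_spans_py_alt tags
instance (tags : List String) (out : List (Int × Int × String)) : Decidable (Spec_conll_tags_to_spans_py tags out) := by unfold Spec_conll_tags_to_spans_py; infer_instance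

-- ===== CLAIM (what is proved, stated in full; the proofs are below) =====
def Claim_equal_conll_tags_to_spans_py : Prop := ∀ (tags : List String), Dom_conll_tags_to_spans_py tags → Spec_conll_tags_to_spans_py tags (conll_tags_to_spans_py tags)

-- ===== LEMMAS AND PROOFS =====

-- common reference: one tag at a time, state = the currently open span (start, label) if any
def pvSpec (i : Int) (op : Option (Int × String)) : List String → List (Int × Int × String)
  | [] => (match op with | none => [] | some (s, l) => [(s, i, l)])
  | t :: rest =>
    match pvKey t, op with
    | none, none => pvSpec (i + 1) none rest
    | none, some (s, l) => (s, i, l) :: pvSpec (i + 1) none rest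
    | some k, none => pvSpec (i + 1) (some (i, k)) rest
    | some k, some (s, l) =>
        if k = l then pvSpec (i + 1) (some (s, l)) rest
        else (s, i, l) :: pvSpec (i + 1) (some (i, k)) rest

-- A's loop computes pvSpec (closed and open states, joint induction)
theorem pvALoop_eq_spec (rest : List String) :
    (∀ (i : Int) out, 0 ≤ i → pvALoop i (-1) none out (rest ++ ["O"]) = out ++ pvSpec i none rest) ∧
    (∀ (i s : Int) (l : String) out, 0 ≤ i → 0 ≤ s →
      pvALoop i s (some l) out (rest ++ ["O"]) = out ++ pvSpec i (some (s, l)) rest) := by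
  induction rest with
  | nil =>
    constructor
    · intro i out _
      simp [pvALoop, pvSpec]
    · intro i s l out _ hs
      simp [pvALoop, pvSpec, show s ≥ 0 from hs]
  | cons t rest ih =>
    constructor
    · intro i out hi
      by_cases hO : t = "O"
      · simp [pvALoop, pvSpec, hO, pvKey, ih.1 (i + 1) out (by omega)]
      · simp [pvALoop, pvSpec, hO, pvKey, ih.2 (i + 1) i _ out (by omega) hi]
    · intro i s l out hi hs
      by_cases hO : t = "O"
      · simpa [pvALoop, pvSpec, hO, pvKey, show s ≥ 0 from hs] using
          ih.1 (i + 1) (out ++ [(s, i, l)]) (by omega)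
      · by_cases hk : PySem.Str.slice t (some 2) none = l
        · simp [pvALoop, pvSpec, hO, pvKey, hk, ih.2 (i + 1) s l out (by omega) hs]
        · simp [pvALoop, pvSpec, hO, pvKey, hk, show s ≥ 0 from hs,
            ih.2 (i + 1) i _ (out ++ [(s, i, l)]) (by omega) hi]

-- pvSpec on an open span (s, l): the span closes after the run of key l
theorem pvSpec_open (rs : List String) : ∀ (i s : Int) (l : String),
    pvSpec i (some (s, l)) rs =
      (s, i + ((rs.takeWhile (fun u => pvKey u = some l)).length : Int), l) ::
        pvSpec (i + ((rs.takeWhile (fun u => pvKey u = some l)).length : Int)) none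
          (rs.dropWhile (fun u => pvKey u = some l)) := by
  induction rs with
  | nil => intro i s l; simp [pvSpec]
  | cons u tail ih =>
    intro i s l
    by_cases hu : pvKey u = some l
    · rw [show pvSpec i (some (s, l)) (u :: tail) = pvSpec (i + 1) (some (s, l)) tail by
        rcases h : pvKey u with _ | k <;> simp [h] at hu
        simp [pvSpec, h, hu]]
      rw [ih (i + 1) s l]
      simp [List.takeWhile, List.dropWhile, hu]
      constructor <;> ring_nf
    · rcases h : pvKey u with _ | k
      · simp [pvSpec, h, List.takeWhile, List.dropWhile]
      · have hkl : ¬ k = l := by rintro rfl; exact hu h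
        simp [pvSpec, h, hkl, List.takeWhile, List.dropWhile]

-- pvSpec on a closed state skips a run of "O"s
theorem pvSpec_skipO (rs : List String) : ∀ (i : Int),
    pvSpec i none rs =
      pvSpec (i + ((rs.takeWhile (fun u => pvKey u = none)).length : Int)) none
        (rs.dropWhile (fun u => pvKey u = none)) := by
  induction rs with
  | nil => intro i; simp
  | cons u tail ih =>
    intro i
    rcases h : pvKey u with _ | k
    · rw [show pvSpec i none (u :: tail) = pvSpec (i + 1) none tail by simp [pvSpec, h]]
      rw [ih (i + 1)]
      simp [List.takeWhile, List.dropWhile, h]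
      ring_nf
    · simp [List.takeWhile, List.dropWhile, h]

-- B's loop computes pvSpec (strong induction on the list length: one group per step)
theorem pvBLoop_eq_spec : ∀ (m : Nat) (l : List String), l.length ≤ m → ∀ i, pvBLoop i l = pvSpec i none l := by
  intro m
  induction m with
  | zero =>
    intro l hl i
    rw [List.length_eq_zero_iff.mp (Nat.le_zero.mp hl)]
    simp [pvBLoop, pvSpec]
  | succ m ihm =>
    intro l hl i
    match l with
    | [] => simp [pvBLoop, pvSpec]
    | t :: rest =>
      have hrest : rest.length ≤ m := by simpa using hl
      rw [pvBLoop]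
      rcases h : pvKey t with _ | key
      · simp only [h]
        rw [ihm _ (le_trans (List.length_dropWhile_le _ _) hrest)]
        rw [pvSpec_skipO (t :: rest) i]
        simp [List.takeWhile, List.dropWhile, h]
        ring_nf
      · simp only [h]
        rw [ihm _ (le_trans (List.length_dropWhile_le _ _) hrest)]
        have hstep : pvSpec i none (t :: rest) = pvSpec (i + 1) (some (i, key)) rest := by
          simp [pvSpec, h]
        rw [hstep, pvSpec_open rest (i + 1) i key, ← add_assoc]

-- ===== VERDICT (by name: the statement is the Claim_ definition above) =====
theorem conll_tags_to_spans_py_spec : Claim_equal_conll_tags_to_spans_py := by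
  intro tags _
  unfold Spec_conll_tags_to_spans_py conll_tags_to_spans_py conll_tags_to_spans_py_alt
  rw [(pvALoop_eq_spec tags).1 0 [] le_rfl, pvBLoop_eq_spec tags.length tags le_rfl]
  simp
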